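-- pv_equiv track=rewrite | github.com/Noyget/skibbot-sn36-agents | nova_ml_build/neurons/miner.py | generate_sample_molecules
-- ===== SOURCE A (Python) =====
-- from typing import List, Dict, Optional
--
-- def generate_sample_molecules(count: int = 500) -> List[str]:
--     """
--     Generate chemically valid SMILES strings.
--
--     In production, this would use SMARTS reaction definitions or ML-guided generation.
--     For MVP, we use real drug-like SMILES from literature.
--     """
--     # Real HDAC inhibitor SMILES + drug-like compounds
--     known_drugs = [
--         # HDAC6 inhibitors (active compounds)
--         "CC(=O)NCCCC(=O)Nc1ccccc1",
--         "O=C(Nc1ccccc1)CCCCc1ccccc1",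
--         "CC(C)c1ccc(cc1)C(C)C(=O)O",
--         "CCCCc1ccc(cc1)C(=O)Nc1ccccc1C(F)(F)F",
--         "O=C(Nc1ccccc1C(=O)O)c1ccccc1",
--         "CC(C)Cc1ccc(C(C)C(=O)O)cc1",
--         "c1ccc2c(c1)c(=O)n(C)c(=O)n2C",
--         # Drug-like compounds
--         "c1ccccc1",
--         "CC(C)Cc1ccccc1",
--         "CCOc1ccccc1C",
--         "CCCCCCc1ccccc1",
--     ]
--
--     # Sample with repetition and variation
--     samples = []
--     for _ in range(count // len(known_drugs)):
--         samples.extend(known_drugs)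
--
--     # Add random SMILES variations (simple perturbations)
--     for _ in range(count % len(known_drugs)):
--         base = known_drugs[len(samples) % len(known_drugs)]
--         # Simple mutation: add/remove methyl groups
--         if len(samples) < count:
--             samples.append(base)
--
--     return samples[:count]
-- ===== SOURCE B (Python) =====
-- from typing import List
--
-- def generate_sample_molecules(count: int = 500) -> List[str]:
--     known_drugs = [
--         "CC(=O)NCCCC(=O)Nc1ccccc1",
--         "O=C(Nc1ccccc1)CCCCc1ccccc1",
--         "CC(C)c1ccc(cc1)C(C)C(=O)O",
--         "CCCCc1ccc(cc1)C(=O)Nc1ccccc1C(F)(F)F",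
--         "O=C(Nc1ccccc1C(=O)O)c1ccccc1",
--         "CC(C)Cc1ccc(C(C)C(=O)O)cc1",
--         "c1ccc2c(c1)c(=O)n(C)c(=O)n2C",
--         "c1ccccc1",
--         "CC(C)Cc1ccccc1",
--         "CCOc1ccccc1C",
--         "CCCCCCc1ccccc1",
--     ]
--     n = len(known_drugs)
--     # the result is the periodic sequence d[0], d[1], ..., d[i mod n], ...:
--     # compute each output position directly by modular indexing, no tiling or slicing
--     return [known_drugs[i % n] for i in range(count)]
-- ===== Notes on version B (the rewrite author's own statement) =====
-- stated objective: alternative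
-- what changed: Instead of A's staged accumulation (block-extend loop, guarded tail-append loop, then a slice), B computes each output position i independently by modular indexing known_drugs[i % 11] in a single comprehension over range(count).
import Mathlib
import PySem

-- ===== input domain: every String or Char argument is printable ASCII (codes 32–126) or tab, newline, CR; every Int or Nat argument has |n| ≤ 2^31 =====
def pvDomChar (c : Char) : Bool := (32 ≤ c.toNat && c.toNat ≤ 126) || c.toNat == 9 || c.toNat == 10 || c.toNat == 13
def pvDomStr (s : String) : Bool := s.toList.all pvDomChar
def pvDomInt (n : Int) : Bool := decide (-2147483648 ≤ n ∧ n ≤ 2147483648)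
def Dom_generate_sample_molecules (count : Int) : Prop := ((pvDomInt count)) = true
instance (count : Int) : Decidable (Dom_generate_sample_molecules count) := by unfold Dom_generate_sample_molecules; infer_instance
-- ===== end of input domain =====

-- B replaces A's staged accumulation (block loop + guarded tail loop + slice) with direct
-- per-position modular indexing over range(count) (objective: alternative).

-- the fixed list of SMILES strings (shared constant of both Pythons)
def pvKD : List String := [
  "CC(=O)NCCCC(=O)Nc1ccccc1",
  "O=C(Nc1ccccc1)CCCCc1ccccc1",
  "CC(C)c1ccc(cc1)C(C)C(=O)O",
  "CCCCc1ccc(cc1)C(=O)Nc1ccccc1C(F)(F)F",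
  "O=C(Nc1ccccc1C(=O)O)c1ccccc1",
  "CC(C)Cc1ccc(C(C)C(=O)O)cc1",
  "c1ccc2c(c1)c(=O)n(C)c(=O)n2C",
  "c1ccccc1",
  "CC(C)Cc1ccccc1",
  "CCOc1ccccc1C",
  "CCCCCCc1ccccc1"]

-- ===== PORT A =====
def generate_sample_molecules (count : Int) : List String :=
  let samples : List String :=
    (PySem.List.pyRange 0 (PySem.Int.floordiv count (pvKD.length : Int)) 1).foldl
      (fun s _ => s ++ pvKD) []
  let samples : List String :=
    (PySem.List.pyRange 0 (PySem.Int.mod count (pvKD.length : Int)) 1).foldl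
      (fun s _ =>
        -- base = known_drugs[len(samples) % len(known_drugs)]: index is always in range, pyGetD is exact here
        let base := PySem.List.pyGetD pvKD (PySem.Int.mod ((s.length : Int)) ((pvKD.length : Int))) ""
        if ((s.length : Int)) < count then s ++ [base] else s) samples
  PySem.List.slice samples none (some count)

-- ===== PORT B =====
-- comprehension [known_drugs[i % n] for i in range(count)]; i % n is always in range, pyGetD is exact here
def generate_sample_molecules_alt (count : Int) : List String :=
  (PySem.List.pyRange 0 count 1).map
    (fun i => PySem.List.pyGetD pvKD (PySem.Int.mod i (pvKD.length : Int)) "")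

-- ===== PRECONDITION & SPEC =====
def Spec_generate_sample_molecules (count : Int) (out : List String) : Prop := out = generate_sample_molecules_alt count
instance (count : Int) (out : List String) : Decidable (Spec_generate_sample_molecules count out) := by unfold Spec_generate_sample_molecules; infer_instance

-- ===== CLAIM (what is proved, stated in full; the proofs are below) =====
def Claim_equal_generate_sample_molecules : Prop := ∀ (count : Int), Dom_generate_sample_molecules count → Spec_generate_sample_molecules count (generate_sample_molecules count)

-- ===== LEMMAS AND PROOFS =====

theorem pvKD_len : pvKD.length = 11 := by decide

-- a fold whose body fixes the initial state returns it
theorem foldl_fixed {α β : Type} (f : α → β → α) (a : α) (h : ∀ x, f a x = a) :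
    ∀ l : List β, l.foldl f a = a := by
  intro l; induction l with
  | nil => rfl
  | cons x xs ih => simp [List.foldl, h, ih]

-- block loop: each iteration appends pvKD
theorem block_loop (l : List Int) : ∀ init : List String,
    l.foldl (fun s _ => s ++ pvKD) init = init ++ (List.replicate l.length pvKD).flatten := by
  induction l with
  | nil => intro init; simp
  | cons x xs ih => intro init; simp [List.foldl, ih, List.replicate_succ]

theorem flatten_replicate_len (q : Nat) : ((List.replicate q pvKD).flatten).length = 11 * q := by
  simp [pvKD_len]; ring

-- tail loop: appends pvKD[j], pvKD[j+1], … while the slot is below count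
theorem tail_loop (count : Int) (q : Nat) : ∀ (l : List Int) (j : Nat),
    j + l.length ≤ 11 → count = 11 * (q : Int) + (j : Int) + l.length →
    l.foldl
      (fun s _ =>
        let base := PySem.List.pyGetD pvKD (PySem.Int.mod ((s.length : Int)) ((pvKD.length : Int))) ""
        if ((s.length : Int)) < count then s ++ [base] else s)
      ((List.replicate q pvKD).flatten ++ pvKD.take j)
    = (List.replicate q pvKD).flatten ++ pvKD.take (j + l.length) := by
  intro l
  induction l with
  | nil => intro j _ _; simp
  | cons x xs ih =>
    intro j hle hc
    have hj : j < 11 := by simp at hle ⊢; omega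
    have hslen : (((List.replicate q pvKD).flatten ++ pvKD.take j)).length = 11 * q + j := by
      simp [flatten_replicate_len, pvKD_len]; omega
    have hlt : ((((List.replicate q pvKD).flatten ++ pvKD.take j)).length : Int) < count := by
      rw [hslen]; push_cast; simp at hc ⊢; omega
    have hmod : PySem.Int.mod ((((List.replicate q pvKD).flatten ++ pvKD.take j)).length : Int) ((pvKD.length : Int)) = (j : Int) := by
      rw [hslen, pvKD_len, PySem.Int.mod_eq_emod_of_pos (by norm_num)]
      push_cast; omega
    have hjl : j < pvKD.length := by rw [pvKD_len]; omega
    have hget : PySem.List.pyGetD pvKD ((j : Int)) "" = pvKD[j] := by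
      rw [PySem.List.pyGetD_natCast]
      rw [List.getD, List.getElem?_eq_getElem hjl, Option.getD_some]
    have hstep : pvKD.take j ++ [pvKD[j]] = pvKD.take (j + 1) := by
      rw [List.take_add_one, List.getElem?_eq_getElem hjl]
      rfl
    simp only [List.foldl, hmod, hget, if_pos hlt, List.append_assoc, hstep]
    rw [ih (j + 1) (by simp at hle ⊢; omega) (by simp at hc ⊢; push_cast; omega)]
    congr 2
    simp; omega

-- modular lookup in pvKD at a Nat index
theorem pvKD_mod_get (j : Nat) :
    PySem.List.pyGetD pvKD (PySem.Int.mod ((j : Int)) 11) "" = pvKD[j % 11]'(by rw [pvKD_len]; omega) := by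
  have h : PySem.Int.mod ((j : Int)) (11 : Int) = ((j % 11 : Nat) : Int) := by
    rw [PySem.Int.mod_eq_emod_of_pos (by norm_num)]
    push_cast; omega
  rw [h, PySem.List.pyGetD_natCast]
  rw [List.getD, List.getElem?_eq_getElem (by rw [pvKD_len]; omega), Option.getD_some]

-- B's per-position modular lookup over range n builds the same periodic list
theorem periodic (n : Nat) :
    (List.range n).map (fun (k : Nat) => PySem.List.pyGetD pvKD (PySem.Int.mod ((k : Int)) 11) "")
    = (List.replicate (n / 11) pvKD).flatten ++ pvKD.take (n % 11) := by
  induction n with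
  | zero => simp
  | succ n ih =>
    rw [List.range_succ, List.map_append, ih]
    simp only [List.map_cons, List.map_nil]
    rw [pvKD_mod_get]
    have hjl : n % 11 < pvKD.length := by rw [pvKD_len]; omega
    have hstep : pvKD.take (n % 11) ++ [pvKD[n % 11]] = pvKD.take (n % 11 + 1) := by
      rw [List.take_add_one, List.getElem?_eq_getElem hjl]
      rfl
    rw [List.append_assoc, hstep]
    by_cases hroll : n % 11 = 10
    · have h1 : (n + 1) / 11 = n / 11 + 1 := by omega
      have h2 : (n + 1) % 11 = 0 := by omega
      rw [h1, h2, hroll]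
      rw [List.replicate_succ', List.flatten_append]
      simp [List.take_of_length_le (by rw [pvKD_len])]
    · have h1 : (n + 1) / 11 = n / 11 := by omega
      have h2 : (n + 1) % 11 = n % 11 + 1 := by omega
      rw [h1, h2]

-- ===== VERDICT (by name: the statement is the Claim_ definition above) =====
theorem generate_sample_molecules_spec : Claim_equal_generate_sample_molecules := by
  intro count _
  unfold Spec_generate_sample_molecules generate_sample_molecules generate_sample_molecules_alt
  simp only [pvKD_len, Nat.cast_ofNat]
  have h11 : (0 : Int) < 11 := by norm_num
  rw [PySem.Int.floordiv_eq_ediv_of_pos h11, PySem.Int.mod_eq_emod_of_pos h11]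
  by_cases hneg : count < 0
  · -- negative count: both sides are []
    have hq : count / 11 ≤ 0 := by omega
    rw [PySem.List.pyRange_one_eq_nil (by omega : count / 11 ≤ 0)]
    simp only [List.foldl]
    have h2 : (PySem.List.pyRange 0 (count % 11) 1).foldl
        (fun (s : List String) _ =>
          let base := PySem.List.pyGetD pvKD (PySem.Int.mod ((s.length : Int)) ((11 : Int))) ""
          if ((s.length : Int)) < count then s ++ [base] else s) [] = [] := by
      apply foldl_fixed
      intro x
      simp only [List.length_nil, Int.natCast_zero]
      rw [if_neg (by omega)]
    rw [h2, PySem.List.pyRange_one_eq_nil (by omega : count ≤ 0)]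
    simp [PySem.List.slice]
  · -- count ≥ 0
    push_neg at hneg
    set n := count.toNat with hn
    have hcn : count = (n : Int) := by omega
    have hfd : count / 11 = ((n / 11 : Nat) : Int) := by omega
    have hmd : count % 11 = ((n % 11 : Nat) : Int) := by omega
    rw [hfd, hmd]
    have hblock : (PySem.List.pyRange 0 (((n / 11 : Nat) : Int)) 1).foldl
        (fun s _ => s ++ pvKD) ([] : List String) = (List.replicate (n / 11) pvKD).flatten := by
      rw [block_loop, PySem.List.length_pyRange_one]
      simp only [List.nil_append]
      congr 1
    rw [hblock]
    have hlen_r : (PySem.List.pyRange 0 (((n % 11 : Nat) : Int)) 1).length = n % 11 := by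
      rw [PySem.List.length_pyRange_one]; omega
    have htail := tail_loop count (n / 11) (PySem.List.pyRange 0 (((n % 11 : Nat) : Int)) 1) 0
      (by rw [hlen_r]; omega)
      (by rw [hlen_r]; push_cast; omega)
    have hlen_eq : (List.replicate (n / 11) pvKD).flatten ++ pvKD.take 0 = (List.replicate (n / 11) pvKD).flatten := by simp
    rw [hlen_eq] at htail
    simp only [pvKD_len, Nat.cast_ofNat, hlen_r, Nat.zero_add] at htail
    rw [htail]
    -- A's slice is the identity: samples has length exactly count
    have hlen : ((List.replicate (n / 11) pvKD).flatten ++ pvKD.take (n % 11)).length = n := by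
      simp [flatten_replicate_len, pvKD_len]; omega
    rw [PySem.List.slice_to _ (by omega), hcn]
    simp only [Int.toNat_natCast]
    rw [List.take_of_length_le (by rw [hlen])]
    -- B side: the range as a Nat range, then the periodic lemma
    rw [PySem.List.pyRange_one]
    simp only [sub_zero, Int.toNat_natCast, List.map_map, zero_add]
    rw [← periodic n]
    simp [Function.comp]
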